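-- pv_equiv track=rewrite | github.com/bembel1993/it-academy-python | homework4_Vitali Bembel/task4.py | uniq_number_list
-- ===== SOURCE A (Python) =====
-- def uniq_number_list(list1, list2):
--     uniqnum1 = []
--     uniqnum2 = []
--     joinlist = []
--     for i in list1:
--         if i not in list2:
--             uniqnum1.append(i)
--
--     for j in list2:
--         if j not in list1:
--             uniqnum2.append(j)
--
--     joinlist = uniqnum1 + uniqnum2
--
--     return len(joinlist)
-- ===== SOURCE B (Python) =====
-- def uniq_number_list(list1, list2):
--     c1 = {}
--     for x in list1:
--         c1[x] = c1.get(x, 0) + 1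
--     c2 = {}
--     for y in list2:
--         c2[y] = c2.get(y, 0) + 1
--     total = 0
--     for k, n in c1.items():
--         if k not in c2:
--             total += n
--     for k, n in c2.items():
--         if k not in c1:
--             total += n
--     return total
-- ===== Notes on version B (the rewrite author's own statement) =====
-- stated objective: faster
-- what changed: B builds frequency dictionaries for both lists once, then sums multiplicities over each dictionary's unique keys that are absent from the other dictionary, replacing A's per-element full-list membership scans.
import Mathlib
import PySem

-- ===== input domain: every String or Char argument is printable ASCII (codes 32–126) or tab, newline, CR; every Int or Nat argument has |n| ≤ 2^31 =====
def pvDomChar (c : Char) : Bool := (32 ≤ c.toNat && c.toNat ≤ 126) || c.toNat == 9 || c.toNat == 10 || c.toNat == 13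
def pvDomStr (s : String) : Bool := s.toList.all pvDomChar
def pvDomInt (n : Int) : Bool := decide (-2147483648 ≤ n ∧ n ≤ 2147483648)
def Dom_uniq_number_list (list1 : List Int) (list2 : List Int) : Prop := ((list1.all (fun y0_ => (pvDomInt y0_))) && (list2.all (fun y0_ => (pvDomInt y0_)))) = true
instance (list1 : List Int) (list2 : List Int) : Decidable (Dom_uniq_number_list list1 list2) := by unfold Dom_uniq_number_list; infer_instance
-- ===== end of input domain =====

-- B replaces A's per-element full-list membership scans by two frequency dictionaries
-- built once, summing multiplicities over unique keys absent from the other dict (faster).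


-- ===== PORT A =====
def uniq_number_list (list1 : List Int) (list2 : List Int) : Int :=
  let uniqnum1 := list1.foldl (fun acc i => if i ∈ list2 then acc else acc ++ [i]) []
  let uniqnum2 := list2.foldl (fun acc j => if j ∈ list1 then acc else acc ++ [j]) []
  let joinlist := uniqnum1 ++ uniqnum2
  (joinlist.length : Int)

-- ===== PORT B =====
def uniq_number_list_alt (list1 : List Int) (list2 : List Int) : Int :=
  let c1 := list1.foldl (fun d x => d.insert x (d.getD x 0 + 1)) PySem.Dict.empty
  let c2 := list2.foldl (fun d y => d.insert y (d.getD y 0 + 1)) PySem.Dict.empty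
  let total := c1.items.foldl (fun t p => if c2.contains p.1 then t else t + p.2) 0
  c2.items.foldl (fun t p => if c1.contains p.1 then t else t + p.2) total

-- ===== PRECONDITION & SPEC =====
def Spec_uniq_number_list (list1 : List Int) (list2 : List Int) (out : Int) : Prop := out = uniq_number_list_alt list1 list2
instance (list1 : List Int) (list2 : List Int) (out : Int) : Decidable (Spec_uniq_number_list list1 list2 out) := by unfold Spec_uniq_number_list; infer_instance

-- ===== CLAIM (what is proved, stated in full; the proofs are below) =====
def Claim_equal_uniq_number_list : Prop := ∀ (list1 : List Int) (list2 : List Int), Dom_uniq_number_list list1 list2 → Spec_uniq_number_list list1 list2 (uniq_number_list list1 list2)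

-- ===== LEMMAS AND PROOFS =====

-- counting a head key k (k ∉ ks) splits off its multiplicity from the filtered length
lemma pv_count_split (k : Int) (ks l l2 : List Int) (hk : k ∉ ks) :
    (l.filter (fun x => decide (x ∈ (k :: ks)) && !decide (x ∈ l2))).length
      = (if k ∈ l2 then 0 else l.count k)
        + (l.filter (fun x => decide (x ∈ ks) && !decide (x ∈ l2))).length := by
  induction l with
  | nil => simp
  | cons x xs ih =>
    simp only [List.filter_cons, List.count_cons]
    by_cases hxk : x = k
    · subst hxk
      have hxks : x ∉ ks := hk
      by_cases hx2 : x ∈ l2 <;>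
        simp [hx2, hxks] at ih ⊢ <;> omega
    · by_cases hx2 : x ∈ l2 <;> by_cases hxks : x ∈ ks <;>
        simp [hxk, hx2, hxks] at ih ⊢ <;> omega

-- summing multiplicities over distinct keys ks equals the filtered length over l
lemma pv_foldl_sum_counts (ks : List Int) (hnd : ks.Nodup) (l l2 : List Int) (t : Int) :
    ks.foldl (fun t k => if k ∈ l2 then t else t + (l.count k : Int)) t
      = t + ((l.filter (fun x => decide (x ∈ ks) && !decide (x ∈ l2))).length : Int) := by
  induction ks generalizing t with
  | nil => simp
  | cons k ks ih =>
    have hk : k ∉ ks := (List.nodup_cons.mp hnd).1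
    rw [List.foldl_cons, ih (List.nodup_cons.mp hnd).2, pv_count_split k ks l l2 hk]
    split_ifs <;> push_cast <;> ring

-- A's append-loop is a filter
lemma pv_A_filter (l l2 : List Int) :
    l.foldl (fun acc i => if i ∈ l2 then acc else acc ++ [i]) []
      = l.filter (fun x => !decide (x ∈ l2)) := by
  have h := PySem.List.foldl_append_if_eq_filter (fun x : Int => !decide (x ∈ l2)) l []
  simp only [List.nil_append] at h
  rw [← h]
  apply PySem.List.foldl_congr_mem
  intro acc x _
  by_cases hx : x ∈ l2 <;> simp [hx]

-- one side: B's pass over counter-l's items counts l's elements absent from l2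
lemma pv_side (l l2 : List Int) (t : Int) :
    (PySem.Dict.counter l).items.foldl
        (fun t p => if (PySem.Dict.counter l2).contains p.1 then t else t + p.2) t
      = t + ((l.filter (fun x => !decide (x ∈ l2))).length : Int) := by
  rw [PySem.Dict.items_counter, List.foldl_map]
  simp only [PySem.Dict.contains_counter, List.contains_eq_mem]
  have hfc : ∀ (tt : Int), (PySem.Set.ofList l).foldl
      (fun t k => if decide (k ∈ l2) = true then t else t + ((l.count k : Int))) tt
      = (PySem.Set.ofList l).foldl (fun t k => if k ∈ l2 then t else t + ((l.count k : Int))) tt := by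
    intro tt
    apply PySem.List.foldl_congr_mem
    intro acc x _
    simp
  rw [hfc, pv_foldl_sum_counts (PySem.Set.ofList l) (PySem.Set.nodup_ofList l) l l2 t]
  have hfilter : l.filter (fun x => decide (x ∈ PySem.Set.ofList l) && !decide (x ∈ l2))
      = l.filter (fun x => !decide (x ∈ l2)) :=
    List.filter_congr (fun x hx => by simp [PySem.Set.mem_ofList, hx])
  rw [hfilter]

-- ===== VERDICT (by name: the statement is the Claim_ definition above) =====
theorem uniq_number_list_spec : Claim_equal_uniq_number_list := by
  intro list1 list2 _
  show uniq_number_list list1 list2 = uniq_number_list_alt list1 list2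
  have hA : uniq_number_list list1 list2 =
      ((list1.foldl (fun acc i => if i ∈ list2 then acc else acc ++ [i]) []
        ++ list2.foldl (fun acc j => if j ∈ list1 then acc else acc ++ [j]) []).length : Int) := rfl
  have hB : uniq_number_list_alt list1 list2 =
      (PySem.Dict.counter list2).items.foldl
        (fun t p => if (PySem.Dict.counter list1).contains p.1 then t else t + p.2)
        ((PySem.Dict.counter list1).items.foldl
          (fun t p => if (PySem.Dict.counter list2).contains p.1 then t else t + p.2) 0) := rfl
  rw [hA, hB, pv_side, pv_side, pv_A_filter, pv_A_filter]
  push_cast [List.length_append]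
  ring
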